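-- pv_equiv track=rewrite | github.com/vgslavov/Problems | leetcode/len_last_word.py | len_last_word3
-- ===== SOURCE A (Python) =====
-- def len_last_word3(s: str) -> int:
--     count = 0
--
--     for i in reversed(range(len(s))):
--         if s[i].isalpha():
--             count += 1
--         elif count:
--             break
--
--     return count
-- ===== SOURCE B (Python) =====
-- def len_last_word3(s: str) -> int:
--     cur = 0
--     last = 0
--     for ch in s:
--         if ch.isalpha():
--             cur += 1
--             last = cur
--         else:
--             cur = 0
--     return last
-- ===== Notes on version B (the rewrite author's own statement) =====
-- stated objective: alternative
-- what changed: Replaces the backward scan with early break by a single forward pass that tracks the current alpha-run length and the length of the most recently completed/extended run, returning the latter.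
import Mathlib
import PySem

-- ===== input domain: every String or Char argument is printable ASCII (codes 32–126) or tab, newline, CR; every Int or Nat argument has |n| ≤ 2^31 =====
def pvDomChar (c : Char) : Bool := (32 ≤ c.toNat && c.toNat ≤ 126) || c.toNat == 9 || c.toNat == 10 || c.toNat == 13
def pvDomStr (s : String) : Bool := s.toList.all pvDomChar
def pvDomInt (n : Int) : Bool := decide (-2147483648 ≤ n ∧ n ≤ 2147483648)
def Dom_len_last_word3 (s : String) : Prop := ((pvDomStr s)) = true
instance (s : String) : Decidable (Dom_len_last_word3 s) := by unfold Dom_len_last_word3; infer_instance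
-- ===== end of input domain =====

-- B replaces A's backward scan with early break by a forward pass tracking the
-- current alpha-run length and the last run length; same cost, different traversal.

-- ===== PORT A =====
-- A iterates i over reversed(range(len(s))) reading s[i]: i.e. the characters in
-- reverse order; 'elif count: break' returns the accumulated count.
def lenLastLoopA : List Char → Int → Int
  | [], count => count
  | c :: rest, count =>
    if PySem.Chars.isalpha c then lenLastLoopA rest (count + 1)
    else if count ≠ 0 then count
    else lenLastLoopA rest count

def len_last_word3 (s : String) : Int := lenLastLoopA s.toList.reverse 0

-- ===== PORT B =====
-- state = (cur, last)
def lenLastStepB (st : Int × Int) (c : Char) : Int × Int :=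
  if PySem.Chars.isalpha c then (st.1 + 1, st.1 + 1) else (0, st.2)

def len_last_word3_alt (s : String) : Int :=
  (s.toList.foldl lenLastStepB ((0 : Int), (0 : Int))).2

-- ===== PRECONDITION & SPEC =====
def Spec_len_last_word3 (s : String) (out : Int) : Prop := out = len_last_word3_alt s
instance (s : String) (out : Int) : Decidable (Spec_len_last_word3 s out) := by unfold Spec_len_last_word3; infer_instance

-- ===== CLAIM (what is proved, stated in full; the proofs are below) =====
def Claim_equal_len_last_word3 : Prop := ∀ (s : String), Dom_len_last_word3 s → Spec_len_last_word3 s (len_last_word3 s)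

-- ===== LEMMAS AND PROOFS =====

-- length of the maximal alpha prefix
def alphaPre : List Char → Int
  | [] => 0
  | c :: r => if PySem.Chars.isalpha c then 1 + alphaPre r else 0

theorem alphaPre_of_all (l : List Char) (h : l.all PySem.Chars.isalpha = true) :
    alphaPre l = l.length := by
  induction l with
  | nil => simp [alphaPre]
  | cons c r ih =>
    simp only [List.all_cons, Bool.and_eq_true] at h
    simp [alphaPre, h.1, ih h.2]
    omega

theorem alphaPre_append (xs ys : List Char) :
    alphaPre (xs ++ ys) =
      if xs.all PySem.Chars.isalpha then (xs.length : Int) + alphaPre ys else alphaPre xs := by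
  induction xs with
  | nil => simp [alphaPre]
  | cons c r ih =>
    by_cases hc : PySem.Chars.isalpha c = true
    · simp [alphaPre, hc, ih]
      split
      · omega
      · omega
    · simp [alphaPre, hc]

theorem loopA_pos (t : List Char) : ∀ c : Int, 0 < c → lenLastLoopA t c = c + alphaPre t := by
  induction t with
  | nil => intro c hc; simp [lenLastLoopA, alphaPre]
  | cons x r ih =>
    intro c hc
    by_cases hx : PySem.Chars.isalpha x = true
    · simp only [lenLastLoopA, alphaPre, hx, if_true]
      rw [ih (c + 1) (by omega)]; omega
    · simp only [lenLastLoopA, alphaPre, hx, if_false, Bool.false_eq_true]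
      have : c ≠ 0 := by omega
      simp [this]

theorem foldB_fst (m : List Char) : ∀ cur last : Int,
    (List.foldl lenLastStepB (cur, last) m).1 =
      if m.all PySem.Chars.isalpha then cur + m.length else alphaPre m.reverse := by
  induction m with
  | nil => intro cur last; simp
  | cons c t ih =>
    intro cur last
    by_cases hc : PySem.Chars.isalpha c = true
    · simp only [List.foldl_cons, lenLastStepB, if_true, ih, List.all_cons, hc,
        Bool.true_and, List.reverse_cons, List.length_cons]
      by_cases ht : t.all PySem.Chars.isalpha = true
      · simp [ht]; omega
      · have : t.reverse.all PySem.Chars.isalpha = false := by simpa using ht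
        simp [ht, alphaPre_append, this]
    · simp only [List.foldl_cons, lenLastStepB, Bool.false_eq_true, if_false, ih,
        List.all_cons, hc, Bool.false_and, List.reverse_cons]
      by_cases ht : t.all PySem.Chars.isalpha = true
      · have hr : t.reverse.all PySem.Chars.isalpha = true := by simpa using ht
        simp [ht, alphaPre_append, hr, alphaPre, hc]
      · have : t.reverse.all PySem.Chars.isalpha = false := by simpa using ht
        simp [ht, alphaPre_append, this]

theorem main_rev (r : List Char) :
    lenLastLoopA r 0 = (List.foldl lenLastStepB ((0 : Int), (0 : Int)) r.reverse).2 := by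
  induction r with
  | nil => simp [lenLastLoopA]
  | cons c t ih =>
    rw [List.reverse_cons, List.foldl_append]
    by_cases hc : PySem.Chars.isalpha c = true
    · simp only [lenLastLoopA, if_true, List.foldl_cons, List.foldl_nil, lenLastStepB, hc]
      rw [show (0:Int)+1 = 1 by omega, loopA_pos t 1 (by omega), foldB_fst]
      by_cases ht : t.all PySem.Chars.isalpha = true
      · have hr : t.reverse.all PySem.Chars.isalpha = true := by simpa using ht
        simp [hr, alphaPre_of_all t ht]; omega
      · have hr : t.reverse.all PySem.Chars.isalpha = false := by simpa using ht
        simp [hr]; omega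
    · simp only [lenLastLoopA, hc, Bool.false_eq_true, if_false, ne_eq,
        not_true_eq_false, List.foldl_cons, List.foldl_nil, lenLastStepB]
      simpa using ih

-- ===== VERDICT (by name: the statement is the Claim_ definition above) =====
theorem len_last_word3_spec : Claim_equal_len_last_word3 := by
  intro s _
  show len_last_word3 s = len_last_word3_alt s
  unfold len_last_word3 len_last_word3_alt
  rw [main_rev, List.reverse_reverse]
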